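-- pv_equiv track=rewrite | github.com/RoyZ1017/Tetris-AI | main.py | get_heuristics
-- ===== SOURCE A (Python) =====
-- def get_heuristics(board):
--     # initialize height and holes
--     height = [0] * len(board[0])
--     holes = [0] * len(board[0])
--
--     # find height and # of holes for each col
--     for col in range(len(board[0])):
--         for row in range(len(board)):
--             if board[row][col] == 1 and height[col] == 0:
--                 height[col] = len(board) - row
--             if height[col] != 0 and board[row][col] == 0:
--                 holes[col] += 1
--
--     # calculate bumpiness
--     # this is done by taking the difference in height between all adjacent columns
--     bumpiness = 0
--     for col in range(len(height) - 1):
--         bumpiness += abs(height[col] - height[col + 1])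
--
--     # calculate number of completed rows
--     rows_cleared = 0
--     for row in range(len(board)):
--         if 0 not in board[row]:
--             rows_cleared += 1
--
--     return height, rows_cleared, holes, bumpiness
-- ===== SOURCE B (Python) =====
-- def get_heuristics(board):
--     # One bottom-up row-major pass: per column, count zeros seen so far; each 1
--     # overwrites height with the current depth and snapshots the zero count as
--     # holes (the topmost 1 wins); rows_cleared is tallied in the same pass.
--     w = len(board[0])
--     height = [0] * w
--     holes = [0] * w
--     zeros = [0] * w
--     rows_cleared = 0
--     for depth, row in enumerate(reversed(board), 1):
--         for c in range(w):
--             cell = row[c]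
--             if cell == 0:
--                 zeros[c] += 1
--             elif cell == 1:
--                 height[c] = depth
--                 holes[c] = zeros[c]
--         if 0 not in row:
--             rows_cleared += 1
--     bumpiness = sum(abs(a - b) for a, b in zip(height, height[1:]))
--     return height, rows_cleared, holes, bumpiness
-- ===== Notes on version B (the rewrite author's own statement) =====
-- stated objective: alternative
-- what changed: B replaces A's column-major nested scan (per column, top-down, flag via height[col]==0) with a single bottom-up row-major pass maintaining per-column running zero counters that each encountered 1 snapshots into holes and overwrites into height, tallying rows_cleared in the same pass.
import Mathlib
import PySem

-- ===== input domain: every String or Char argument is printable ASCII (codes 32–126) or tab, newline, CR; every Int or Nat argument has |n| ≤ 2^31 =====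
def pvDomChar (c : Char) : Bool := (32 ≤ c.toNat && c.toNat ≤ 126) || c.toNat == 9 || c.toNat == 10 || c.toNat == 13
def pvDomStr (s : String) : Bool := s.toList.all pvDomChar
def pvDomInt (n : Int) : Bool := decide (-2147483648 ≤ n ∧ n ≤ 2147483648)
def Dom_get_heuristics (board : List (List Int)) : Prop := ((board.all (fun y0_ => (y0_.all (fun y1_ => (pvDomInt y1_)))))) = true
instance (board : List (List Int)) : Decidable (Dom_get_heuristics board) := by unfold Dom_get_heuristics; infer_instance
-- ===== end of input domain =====

-- B replaces A's column-major nested scan with one bottom-up row-major pass that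
-- keeps per-column running zero counters (objective: alternative decomposition);
-- equivalence is about the return value.

-- ===== PORT A =====
-- one step of A's inner 'for row' loop body at column c (st = (height, holes))
def pvStepA (n : Int) (c : Int) (st : List Int × List Int) (row : Int)
    (rowList : List Int) : List Int × List Int :=
  let cell := PySem.List.pyGetD rowList c 0
  let st1 := if cell = 1 ∧ PySem.List.pyGetD st.1 c 0 = 0
             then (st.1.set c.toNat (n - row), st.2) else st
  if st1.1.getD c.toNat 0 ≠ 0 ∧ cell = 0
  then (st1.1, st1.2.set c.toNat (st1.2.getD c.toNat 0 + 1)) else st1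

def get_heuristics (board : List (List Int)) : List Int × Int × List Int × Int :=
  let w : Nat := (PySem.List.pyGetD board 0 []).length
  let height : List Int := List.replicate w 0
  let holes : List Int := List.replicate w 0
  let n : Int := board.length
  let st := (PySem.List.pyRange 0 (w : Int)).foldl (fun st col =>
      (PySem.List.pyRange 0 n).foldl
        (fun st row => pvStepA n col st row (PySem.List.pyGetD board row [])) st)
    (height, holes)
  let bumpiness := (PySem.List.pyRange 0 ((st.1.length : Int) - 1)).foldl
      (fun acc col => acc + |PySem.List.pyGetD st.1 col 0 - PySem.List.pyGetD st.1 (col + 1) 0|) 0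
  let rows_cleared := (PySem.List.pyRange 0 n).foldl
      (fun acc row => if (PySem.List.pyGetD board row []).contains 0 then acc else acc + 1) 0
  (st.1, rows_cleared, st.2, bumpiness)

-- ===== PORT B =====
-- Source B's inner 'for c in range(w)' loop on one row (s = (height, holes, zeros))
def pvBRow (w : Nat) (depth : Int) (s : List Int × List Int × List Int)
    (row : List Int) : List Int × List Int × List Int :=
  (List.range w).foldl (fun (s : List Int × List Int × List Int) (c : Nat) =>
    let cell := PySem.List.pyGetD row (c : Int) 0
    if cell = 0 then (s.1, s.2.1, s.2.2.set c (s.2.2.getD c 0 + 1))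
    else if cell = 1 then (s.1.set c depth, s.2.1.set c (s.2.2.getD c 0), s.2.2)
    else s) s

def get_heuristics_alt (board : List (List Int)) : List Int × Int × List Int × Int :=
  let w : Nat := (PySem.List.pyGetD board 0 []).length
  let st := (PySem.List.enumerate board.reverse 1).foldl
      (fun (st : (List Int × List Int × List Int) × Int) p =>
        (pvBRow w p.1 st.1 p.2, if p.2.contains 0 then st.2 else st.2 + 1))
      ((List.replicate w 0, List.replicate w 0, List.replicate w 0), 0)
  let height := st.1.1
  let bumpiness := ((height.zip height.tail).map (fun p => |p.1 - p.2|)).sum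
  (height, st.2, st.1.2.1, bumpiness)

-- ===== PRECONDITION & SPEC =====
-- A indexes board[0] and board[row][col] for col < len(board[0]): it raises IndexError
-- exactly when the board is empty or some row is shorter than the first row (B raises there too).
def Pre_get_heuristics (board : List (List Int)) : Prop :=
  board ≠ [] ∧ ∀ r ∈ board, board.headI.length ≤ r.length
instance (board : List (List Int)) : Decidable (Pre_get_heuristics board) := by
  unfold Pre_get_heuristics; infer_instance

def pvWitness_get_heuristics : List (List Int) := [[0, 1], [1, 0]]

def Spec_get_heuristics (board : List (List Int)) (out : List Int × Int × List Int × Int) : Prop := out = get_heuristics_alt board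
instance (board : List (List Int)) (out : List Int × Int × List Int × Int) : Decidable (Spec_get_heuristics board out) := by unfold Spec_get_heuristics; infer_instance

-- ===== CLAIM (what is proved, stated in full; the proofs are below) =====
def Claim_equal_get_heuristics : Prop := ∀ (board : List (List Int)), Dom_get_heuristics board → Pre_get_heuristics board → Spec_get_heuristics board (get_heuristics board)

-- ===== LEMMAS AND PROOFS =====

-- the column at index j, top row first
def pvCol (board : List (List Int)) (j : Nat) : List Int := board.map (fun r => r.getD j 0)

-- per-column height and holes in terms of the first 1 from the top
def pvH (n : Int) (col : List Int) : Int :=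
  match PySem.List.index? col 1 with
  | some i => n - (i : Int)
  | none => 0
def pvO (col : List Int) : Int :=
  match PySem.List.index? col 1 with
  | some i => ((col.drop i).count 0 : Int)
  | none => 0

lemma getD_set_self' (l : List Int) (c : Nat) (v : Int) (h : c < l.length) :
    (l.set c v).getD c 0 = v := by
  simp [List.getD_eq_getElem?_getD, h]

lemma set_getD_self' (l : List Int) (c : Nat) (h : c < l.length) :
    l.set c (l.getD c 0) = l := by
  simp [List.getD_eq_getElem?_getD, List.getElem?_eq_getElem h]

-- ---- A's inner row loop, as a scan of the column ----
lemma stepA_seen (n : Int) (c : Nat) (H O : List Int) (s : Int) (r : List Int)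
    (hH : H.getD c 0 ≠ 0) :
    pvStepA n (c : Int) (H, O) s r =
      if r.getD c 0 = 0 then (H, O.set c (O.getD c 0 + 1)) else (H, O) := by
  simp only [pvStepA, PySem.List.pyGetD_natCast, Int.toNat_natCast]
  split_ifs <;> simp_all

lemma stepA_fresh (n : Int) (c : Nat) (H O : List Int) (s : Int) (r : List Int)
    (hH : H.getD c 0 = 0) :
    pvStepA n (c : Int) (H, O) s r =
      if r.getD c 0 = 1 then (H.set c (n - s), O) else (H, O) := by
  simp only [pvStepA, PySem.List.pyGetD_natCast, Int.toNat_natCast]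
  split_ifs <;> simp_all

-- after the first 1 has been seen (height entry ≠ 0), every later 0 is a hole
lemma scan_after (c : Nat) (n : Int) : ∀ (rows : List (List Int)) (s : Int)
    (H O : List Int), c < O.length → H.getD c 0 ≠ 0 →
    (PySem.List.enumerate rows s).foldl
      (fun st p => pvStepA n (c : Int) st p.1 p.2) (H, O)
    = (H, O.set c (O.getD c 0 + ((rows.map (fun r => r.getD c 0)).count 0 : Int))) := by
  intro rows
  induction rows with
  | nil =>
    intro s H O hc hH
    rw [PySem.List.enumerate_nil]
    simp only [List.foldl_nil, List.map_nil, List.count_nil, Nat.cast_zero, add_zero,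
      set_getD_self' O c hc]
  | cons r t ih =>
    intro s H O hc hH
    rw [PySem.List.enumerate_cons, List.foldl_cons, stepA_seen n c H O s r hH]
    by_cases h0 : r.getD c 0 = 0
    · rw [if_pos h0, ih (s + 1) H _ (by simpa using hc) hH]
      rw [getD_set_self' O c _ hc, List.set_set]
      have hcnt : (List.map (fun r => r.getD c 0) (r :: t)).count 0
          = (List.map (fun r => r.getD c 0) t).count 0 + 1 := by
        simp only [List.map_cons, List.count_cons, beq_iff_eq, h0]
        simp
      rw [hcnt]
      exact congrArg (fun v => (H, O.set c v)) (by push_cast; ring)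
    · rw [if_neg h0, ih (s + 1) H O hc hH]
      have hcnt : (List.map (fun r => r.getD c 0) (r :: t)).count 0
          = (List.map (fun r => r.getD c 0) t).count 0 := by
        simp only [List.map_cons, List.count_cons, beq_iff_eq]
        rw [if_neg h0, add_zero]
      rw [hcnt]

-- from a fresh column (height entry = 0): the first 1 sets the height, zeros after it are holes
lemma scan_fresh (c : Nat) (n : Int) : ∀ (rows : List (List Int)) (s : Int)
    (H O : List Int), c < H.length → c < O.length → H.getD c 0 = 0 →
    s + rows.length ≤ n →
    (PySem.List.enumerate rows s).foldl
      (fun st p => pvStepA n (c : Int) st p.1 p.2) (H, O)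
    = (match PySem.List.index? (rows.map (fun r => r.getD c 0)) 1 with
       | some i => (H.set c (n - s - (i : Int)),
                    O.set c (O.getD c 0 + (((rows.map (fun r => r.getD c 0)).drop i).count 0 : Int)))
       | none => (H, O)) := by
  intro rows
  induction rows with
  | nil =>
    intro s H O hcH hcO hH hs
    rw [PySem.List.enumerate_nil]
    simp [PySem.List.index?]
  | cons r t ih =>
    intro s H O hcH hcO hH hs
    rw [PySem.List.enumerate_cons, List.foldl_cons, stepA_fresh n c H O s r hH]
    by_cases h1 : r.getD c 0 = 1
    · rw [if_pos h1]
      have hne : (H.set c (n - s)).getD c 0 ≠ 0 := by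
        rw [getD_set_self' H c _ hcH]
        simp only [List.length_cons] at hs
        omega
      rw [scan_after c n t (s + 1) _ O hcO hne]
      simp only [List.map_cons, h1, PySem.List.index?_cons_self]
      simp
    · rw [if_neg h1, ih (s + 1) H O hcH hcO hH (by simp only [List.length_cons] at hs; omega)]
      simp only [List.map_cons]
      rw [PySem.List.index?_cons_of_ne _ h1]
      cases hio : PySem.List.index? (t.map (fun r => r.getD c 0)) 1 with
      | none => simp
      | some i =>
        simp only [Option.map_some]
        push_cast
        congr 2
        ring

-- the whole inner loop on one fresh column, row index from 0
lemma scan_col (board : List (List Int)) (c : Nat) (H O : List Int)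
    (hcH : c < H.length) (hcO : c < O.length) (hH : H.getD c 0 = 0) (hO : O.getD c 0 = 0) :
    (PySem.List.pyRange 0 (board.length : Int)).foldl
      (fun st row => pvStepA (board.length : Int) (c : Int) st row (PySem.List.pyGetD board row [])) (H, O)
    = (H.set c (pvH (board.length : Int) (pvCol board c)), O.set c (pvO (pvCol board c))) := by
  have henum : (PySem.List.enumerate board 0).foldl
      (fun st p => pvStepA (board.length : Int) (c : Int) st p.1 p.2) (H, O)
    = (PySem.List.pyRange 0 (board.length : Int)).foldl
      (fun st row => pvStepA (board.length : Int) (c : Int) st row (PySem.List.pyGetD board row [])) (H, O) := by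
    rw [PySem.List.enumerate_eq_map_pyRange board [], List.foldl_map]
    rfl
  rw [← henum, scan_fresh c (board.length : Int) board 0 H O hcH hcO hH (by simp)]
  unfold pvH pvO pvCol
  cases hio : PySem.List.index? (board.map (fun r => r.getD c 0)) 1 with
  | none =>
    simp only [hio]
    have e1 : H.set c (0 : Int) = H := by
      calc H.set c (0 : Int) = H.set c (H.getD c 0) := by rw [hH]
        _ = H := set_getD_self' H c hcH
    have e2 : O.set c (0 : Int) = O := by
      calc O.set c (0 : Int) = O.set c (O.getD c 0) := by rw [hO]
        _ = O := set_getD_self' O c hcO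
    rw [e1, e2]
  | some i =>
    simp only [hio]
    rw [hO]
    simp

-- setting index m in an 'if j < m' map advances the boundary
lemma set_map_range (w m : Nat) (hm : m < w) (f g : Nat → Int) :
    (((List.range w).map (fun j => if j < m then g j else f j)).set m (g m))
    = (List.range w).map (fun j => if j < m + 1 then g j else f j) := by
  apply List.ext_getElem
  · simp
  · intro k hk1 hk2
    simp only [List.getElem_set, List.getElem_map, List.getElem_range]
    by_cases hkm : m = k
    · subst hkm
      simp
    · rw [if_neg hkm]
      by_cases h : k < m
      · rw [if_pos h, if_pos (by omega)]
      · rw [if_neg h, if_neg (by omega)]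

-- an 'if j < m' map may advance the boundary when the two functions agree at m
lemma map_ite_succ (w m : Nat) (f g : Nat → Int) (hfg : f m = g m) :
    (List.range w).map (fun j => if j < m then g j else f j)
    = (List.range w).map (fun j => if j < m + 1 then g j else f j) := by
  apply List.map_congr_left
  intro j _
  by_cases h : j < m
  · rw [if_pos h, if_pos (by omega)]
  · by_cases h' : j = m
    · subst h'
      rw [if_neg h, if_pos (by omega), hfg]
    · rw [if_neg h, if_neg (by omega)]

-- A's outer column loop fills in the per-column values one index at a time
lemma outer_loop (board : List (List Int)) (w : Nat) (m : Nat) (_hm : m ≤ w) :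
    (PySem.List.pyRange 0 (m : Int)).foldl (fun st col =>
      (PySem.List.pyRange 0 (board.length : Int)).foldl
        (fun st row => pvStepA (board.length : Int) col st row (PySem.List.pyGetD board row [])) st)
      (List.replicate w 0, List.replicate w 0)
    = ((List.range w).map (fun j => if j < m then pvH (board.length : Int) (pvCol board j) else 0),
       (List.range w).map (fun j => if j < m then pvO (pvCol board j) else 0)) := by
  induction m with
  | zero =>
    have hz : ∀ g : Nat → Int,
        (List.range w).map (fun j => if j < 0 then g j else 0) = List.replicate w (0 : Int) := by
      intro g
      apply List.ext_getElem
      · simp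
      · intro k hk1 hk2
        simp
    simp only [Nat.cast_zero, PySem.List.pyRange_one_eq_nil (le_refl 0), List.foldl_nil]
    rw [hz, hz]
  | succ m ih =>
    have hm' : m ≤ w := by omega
    rw [show ((m + 1 : Nat) : Int) = (m : Int) + 1 by push_cast; ring,
        PySem.List.pyRange_one_succ_right (by positivity), List.foldl_append, ih hm']
    simp only [List.foldl_cons, List.foldl_nil]
    rw [scan_col board m _ _ (by simp; omega) (by simp; omega)
        (by rw [PySem.List.getD_map_range _ _ _ _ (by omega)]; simp)
        (by rw [PySem.List.getD_map_range _ _ _ _ (by omega)]; simp)]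
    rw [show (pvH (board.length : Int) (pvCol board m))
          = (fun j => pvH (board.length : Int) (pvCol board j)) m from rfl,
        show (pvO (pvCol board m)) = (fun j => pvO (pvCol board j)) m from rfl,
        set_map_range w m (by omega), set_map_range w m (by omega)]

-- ---- B: per-column model of the bottom-up scan ----
def pvCellStep (depth cell : Int) (s : Int × Int × Int) : Int × Int × Int :=
  if cell = 0 then (s.1, s.2.1, s.2.2 + 1)
  else if cell = 1 then (depth, s.2.2, s.2.2)
  else s

def pvColScan : Int → Int × Int × Int → List Int → Int × Int × Int
  | _, s, [] => s
  | d, s, x :: t => pvColScan (d + 1) (pvCellStep d x s) t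

lemma colScan_append (t : List Int) : ∀ (x d : Int) (s : Int × Int × Int),
    pvColScan d s (t ++ [x]) = pvCellStep (d + t.length) x (pvColScan d s t) := by
  induction t with
  | nil => intro x d s; simp [pvColScan]
  | cons y t ih =>
    intro x d s
    simp only [List.cons_append, pvColScan, ih, List.length_cons]
    congr 1
    push_cast
    ring

-- scanning a column bottom-up from (0,0,0): height and holes of its topmost 1, total zeros
lemma colScan_reverse_char (col : List Int) :
    pvColScan 1 (0, 0, 0) col.reverse
    = (pvH (col.length : Int) col, pvO col, (col.count 0 : Int)) := by
  induction col with
  | nil => simp [pvColScan, pvH, pvO, PySem.List.index?]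
  | cons x t ih =>
    rw [List.reverse_cons, colScan_append, ih]
    simp only [List.length_reverse, List.length_cons]
    by_cases h0 : x = 0
    · subst h0
      have h' : PySem.List.index? ((0 : Int) :: t) 1 = (PySem.List.index? t 1).map (· + 1) :=
        PySem.List.index?_cons_of_ne _ (by norm_num)
      cases hio : PySem.List.index? t 1 with
      | none =>
        simp only [pvH, pvO, h', hio, Option.map_none]
        simp [pvCellStep, List.count_cons] <;> (push_cast; omega)
      | some i =>
        simp only [pvH, pvO, h', hio, Option.map_some]
        simp [pvCellStep, List.count_cons, Prod.ext_iff] <;> (push_cast; omega)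
    · by_cases h1 : x = 1
      · subst h1
        simp only [pvH, pvO, PySem.List.index?_cons_self]
        simp [pvCellStep, List.count_cons, Prod.ext_iff] <;> (push_cast; omega)
      · have h' : PySem.List.index? (x :: t) 1 = (PySem.List.index? t 1).map (· + 1) :=
          PySem.List.index?_cons_of_ne _ h1
        cases hio : PySem.List.index? t 1 with
        | none =>
          simp only [pvH, pvO, h', hio, Option.map_none]
          simp [pvCellStep, List.count_cons, h0, h1] <;> (push_cast; omega)
        | some i =>
          simp only [pvH, pvO, h', hio, Option.map_some]
          simp [pvCellStep, List.count_cons, h0, h1, Prod.ext_iff] <;> (push_cast; omega)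

-- Source B's inner loop, pointwise: each column index is updated by pvCellStep
lemma pvBRow_char (w : Nat) (depth : Int) (row : List Int) (h o z : Nat → Int) :
    pvBRow w depth ((List.range w).map h, (List.range w).map o, (List.range w).map z) row
    = ((List.range w).map (fun j => (pvCellStep depth (row.getD j 0) (h j, o j, z j)).1),
       (List.range w).map (fun j => (pvCellStep depth (row.getD j 0) (h j, o j, z j)).2.1),
       (List.range w).map (fun j => (pvCellStep depth (row.getD j 0) (h j, o j, z j)).2.2)) := by
  unfold pvBRow
  suffices haux : ∀ m, m ≤ w → (List.range m).foldl (fun (s : List Int × List Int × List Int) (c : Nat) =>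
      let cell := PySem.List.pyGetD row (c : Int) 0
      if cell = 0 then (s.1, s.2.1, s.2.2.set c (s.2.2.getD c 0 + 1))
      else if cell = 1 then (s.1.set c depth, s.2.1.set c (s.2.2.getD c 0), s.2.2)
      else s) ((List.range w).map h, (List.range w).map o, (List.range w).map z)
    = ((List.range w).map (fun j => if j < m then (pvCellStep depth (row.getD j 0) (h j, o j, z j)).1 else h j),
       (List.range w).map (fun j => if j < m then (pvCellStep depth (row.getD j 0) (h j, o j, z j)).2.1 else o j),
       (List.range w).map (fun j => if j < m then (pvCellStep depth (row.getD j 0) (h j, o j, z j)).2.2 else z j)) by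
    rw [haux w (le_refl w)]
    refine congrArg₂ _ ?_ (congrArg₂ _ ?_ ?_) <;>
      (apply List.map_congr_left; intro j hj; rw [if_pos (List.mem_range.mp hj)])
  intro m hm
  induction m with
  | zero =>
    simp only [List.range_zero, List.foldl_nil]
    refine congrArg₂ _ ?_ (congrArg₂ _ ?_ ?_) <;>
      (apply List.map_congr_left; intro j _; rw [if_neg (by omega)])
  | succ m ih =>
    rw [List.range_succ, List.foldl_append, ih (by omega)]
    simp only [List.foldl_cons, List.foldl_nil, PySem.List.pyGetD_natCast,
      List.getD_eq_getElem?_getD]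
    split_ifs with h0 h1
    · refine congrArg₂ _ ?_ (congrArg₂ _ ?_ ?_)
      · exact map_ite_succ w m h _ (by simp [pvCellStep, h0])
      · exact map_ite_succ w m o _ (by simp [pvCellStep, h0])
      · have hmw : m < w := by omega
        convert set_map_range w m hmw z
          (fun j => (pvCellStep depth (row[j]?.getD 0) (h j, o j, z j)).2.2) using 2 <;>
          simp [pvCellStep, h0, hmw]
    · refine congrArg₂ _ ?_ (congrArg₂ _ ?_ ?_)
      · have hmw : m < w := by omega
        convert set_map_range w m hmw h
          (fun j => (pvCellStep depth (row[j]?.getD 0) (h j, o j, z j)).1) using 2 <;>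
          simp [pvCellStep, h0, h1, hmw]
      · have hmw : m < w := by omega
        convert set_map_range w m hmw o
          (fun j => (pvCellStep depth (row[j]?.getD 0) (h j, o j, z j)).2.1) using 2 <;>
          simp [pvCellStep, h0, h1, hmw]
      · exact map_ite_succ w m z _ (by simp [pvCellStep, h0, h1])
    · refine congrArg₂ _ ?_ (congrArg₂ _ ?_ ?_)
      · exact map_ite_succ w m h _ (by simp [pvCellStep, h0, h1])
      · exact map_ite_succ w m o _ (by simp [pvCellStep, h0, h1])
      · exact map_ite_succ w m z _ (by simp [pvCellStep, h0, h1])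

-- Source B's outer row loop (triple part) is pvColScan per column
lemma outerB (w : Nat) : ∀ (rs : List (List Int)) (d : Int) (h o z : Nat → Int),
    (PySem.List.enumerate rs d).foldl (fun s p => pvBRow w p.1 s p.2)
      ((List.range w).map h, (List.range w).map o, (List.range w).map z)
    = ((List.range w).map (fun j => (pvColScan d (h j, o j, z j) (rs.map (fun r => r.getD j 0))).1),
       (List.range w).map (fun j => (pvColScan d (h j, o j, z j) (rs.map (fun r => r.getD j 0))).2.1),
       (List.range w).map (fun j => (pvColScan d (h j, o j, z j) (rs.map (fun r => r.getD j 0))).2.2)) := by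
  intro rs
  induction rs with
  | nil => intro d h o z; simp [PySem.List.enumerate_nil, pvColScan]
  | cons r t ih =>
    intro d h o z
    rw [PySem.List.enumerate_cons, List.foldl_cons, pvBRow_char, ih]
    simp only [List.map_cons, pvColScan]

-- a product-state fold splits into two independent folds
lemma foldl_pair_split {α β γ : Type} (f : α → γ → α) (g : β → γ → β) :
    ∀ (l : List γ) (a : α) (b : β),
    l.foldl (fun s p => (f s.1 p, g s.2 p)) (a, b) = (l.foldl f a, l.foldl g b) := by
  intro l
  induction l with
  | nil => intro a b; rfl
  | cons x t ih => intro a b; simp only [List.foldl_cons, ih]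

-- a fold over enumerate that ignores the index is a fold over the list
lemma foldl_enumerate_snd {β : Type} (g : β → List Int → β) :
    ∀ (l : List (List Int)) (s : Int) (b : β),
    (PySem.List.enumerate l s).foldl (fun b p => g b p.2) b = l.foldl g b := by
  intro l
  induction l with
  | nil => intro s b; rw [PySem.List.enumerate_nil]; rfl
  | cons x t ih => intro s b; rw [PySem.List.enumerate_cons]; simp only [List.foldl_cons, ih]

-- rows-cleared folds count the rows without a 0
lemma rows_count (l : List (List Int)) :
    l.foldl (fun (acc : Int) row => if row.contains 0 then acc else acc + 1) 0
    = ((l.countP (fun row => !row.contains 0)) : Int) := by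
  rw [PySem.List.foldl_congr_mem l
      (fun (acc : Int) (row : List Int) => if row.contains 0 then acc else acc + 1)
      (fun (acc : Int) (row : List Int) => if (!row.contains 0) then acc + 1 else acc)
      0 (by intro acc row _; by_cases h : row.contains 0 <;> simp [h])]
  rw [PySem.List.foldl_if_add_one, zero_add]

lemma head_len (board : List (List Int)) :
    (PySem.List.pyGetD board 0 []).length = board.headI.length := by
  cases board with
  | nil => rfl
  | cons x t => rw [show (0 : Int) = ((0 : Nat) : Int) by rfl, PySem.List.pyGetD_natCast]; rfl

lemma replicate_eq_map_range (w : Nat) :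
    List.replicate w (0 : Int) = (List.range w).map (fun _ => 0) := by
  apply List.ext_getElem
  · simp
  · intro k hk1 hk2
    simp

-- bumpiness: A's index loop is the sum over adjacent pairs B computes
lemma bump_eq (H : List Int) :
    (PySem.List.pyRange 0 ((H.length : Int) - 1)).foldl
      (fun acc col => acc + |PySem.List.pyGetD H col 0 - PySem.List.pyGetD H (col + 1) 0|) 0
    = ((H.zip H.tail).map (fun p => |p.1 - p.2|)).sum := by
  rw [PySem.List.foldl_add, zero_add]
  congr 1
  apply List.ext_getElem
  · simp [PySem.List.length_pyRange_one]
  · intro k hk1 hk2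
    simp only [List.getElem_map]
    have hlen : k < H.length - 1 := by
      simp [PySem.List.length_pyRange_one] at hk1; omega
    rw [PySem.List.getElem_pyRange_one, List.getElem_zip]
    rw [show ((0 : Int) + (k : Int)) = ((k : Nat) : Int) by ring]
    rw [show (((k : Nat) : Int) + 1) = (((k + 1 : Nat)) : Int) by push_cast; ring]
    rw [PySem.List.pyGetD_natCast, PySem.List.pyGetD_natCast]
    rw [List.getD_eq_getElem _ _ (by omega), List.getD_eq_getElem _ _ (by omega)]
    simp [List.getElem_tail]

theorem get_heuristics_spec : Claim_equal_get_heuristics := by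
  intro board _ hpre
  obtain ⟨h1, h2⟩ := hpre
  simp only [Spec_get_heuristics, get_heuristics, get_heuristics_alt, head_len]
  set w := board.headI.length with hw
  -- B's combined fold splits into the triple fold and the rows-cleared fold
  rw [foldl_pair_split (fun s (p : Int × List Int) => pvBRow w p.1 s p.2)
        (fun (rc : Int) (p : Int × List Int) => if p.2.contains 0 then rc else rc + 1)]
  rw [outer_loop board w w (le_refl _)]
  rw [replicate_eq_map_range, outerB]
  -- B's per-column scans give pvH / pvO of each column
  have hcolB : ∀ j : Nat,
      pvColScan 1 ((0 : Int), (0 : Int), (0 : Int)) (board.reverse.map (fun r => r.getD j 0))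
      = (pvH (board.length : Int) (pvCol board j), pvO (pvCol board j),
         ((pvCol board j).count 0 : Int)) := by
    intro j
    rw [List.map_reverse]
    have := colScan_reverse_char (pvCol board j)
    simpa [pvCol] using this
  have hmapH : (List.range w).map
      (fun j => if j < w then pvH (board.length : Int) (pvCol board j) else 0)
      = (List.range w).map
        (fun j => (pvColScan 1 ((0:Int),(0:Int),(0:Int)) (board.reverse.map (fun r => r.getD j 0))).1) := by
    apply List.map_congr_left
    intro j hj
    rw [if_pos (List.mem_range.mp hj), hcolB j]
  have hmapO : (List.range w).map
      (fun j => if j < w then pvO (pvCol board j) else 0)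
      = (List.range w).map
        (fun j => (pvColScan 1 ((0:Int),(0:Int),(0:Int)) (board.reverse.map (fun r => r.getD j 0))).2.1) := by
    apply List.map_congr_left
    intro j hj
    rw [if_pos (List.mem_range.mp hj), hcolB j]
  -- rows cleared agree: both count rows without a 0 (order of rows is irrelevant)
  have hrc : (PySem.List.pyRange 0 (board.length : Int)).foldl
      (fun (acc : Int) row => if (PySem.List.pyGetD board row []).contains 0 then acc else acc + 1) 0
      = (PySem.List.enumerate board.reverse 1).foldl
        (fun (rc : Int) p => if p.2.contains 0 then rc else rc + 1) 0 := by
    rw [PySem.List.foldl_pyRange_zero_pyGetD' board []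
      (fun (acc : Int) (r : List Int) => if r.contains 0 then acc else acc + 1) 0]
    rw [foldl_enumerate_snd
      (fun (rc : Int) (r : List Int) => if r.contains 0 then rc else rc + 1) board.reverse 1 0]
    rw [rows_count, rows_count, List.countP_reverse]
  rw [hmapH, hmapO, hrc, bump_eq]
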